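-- pv_equiv track=rewrite | github.com/rwambangho/algorithm-study | 프로그래머스/1/42840. 모의고사/모의고사.py | solution
-- ===== SOURCE A (Python) =====
-- def solution(answers):
--     answer = []
--     a=len(answers)
--     cnt1, cnt2, cnt3 = 0, 0, 0
--     n1=[[1,2,3,4,5] for _ in range(a)]
--     n2=[[ 2, 1, 2, 3, 2, 4, 2, 5]for _ in range(a)]
--     n3=[[3, 3, 1, 1, 2, 2, 4, 4, 5, 5]for _ in range(a)]
--     s1=[item for row in n1 for item in row]
--     s2=[item for row in n2 for item in row]
--     s3=[item for row in n3 for item in row]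
--
--
--     for i in range(a):
--         if s1[i] == answers[i]:
--             cnt1+=1
--         if s2[i]==answers[i]:
--             cnt2+=1
--         if s3[i]==answers[i]:
--             cnt3+=1
--
--
--     if cnt1 > cnt2 and cnt1 > cnt3: #1
--         answer.append(1)
--     elif cnt2 > cnt1 and cnt2 > cnt3: #2
--         answer.append(2)
--     elif cnt3 > cnt1 and cnt3 > cnt2: #4
--         answer.append(3)
--     elif cnt1 > cnt3 and cnt2 > cnt3 and cnt1 == cnt2: #1 2
--         answer.append(1)
--         answer.append(2)
--     elif cnt1 > cnt2 and cnt3 > cnt2 and cnt1 == cnt3: # 1 3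
--         answer.append(1)
--         answer.append(3)
--     elif cnt2 > cnt1 and cnt3 > cnt1 and cnt2 == cnt3: # 2 3
--         answer.append(2)
--         answer.append(3)
--     elif cnt1 == cnt2 == cnt3: # 1 2 3
--         answer.append(1)
--         answer.append(2)
--         answer.append(3)
--
--
--     return answer
-- ===== SOURCE B (Python) =====
-- def solution(answers):
--     # Residue-class frequency table: one pass tallies (i % 40, answer) pairs
--     # (40 = lcm of the three pattern lengths), then each pattern's score is a
--     # 40-term table lookup sum -- no per-pattern scan of the answers.
--     freq = {}
--     for i, a in enumerate(answers):
--         key = (i % 40, a)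
--         freq[key] = freq.get(key, 0) + 1
--
--     def score(p):
--         return sum(freq.get((r, p[r % len(p)]), 0) for r in range(40))
--
--     s1 = score([1, 2, 3, 4, 5])
--     s2 = score([2, 1, 2, 3, 2, 4, 2, 5])
--     s3 = score([3, 3, 1, 1, 2, 2, 4, 4, 5, 5])
--     best = max(s1, s2, s3)
--     return [k for k, s in ((1, s1), (2, s2), (3, s3)) if s == best]
-- ===== Notes on version B (the rewrite author's own statement) =====
-- stated objective: faster
-- what changed: B tallies (index % 40, answer) pairs into one frequency dict in a single pass (40 = lcm of the pattern lengths) and reads each student's score as a fixed 40-term table-lookup sum, instead of A's building three flattened pattern copies of length 5n/8n/10n and comparing them index by index; winners are picked by max + filter instead of a seven-branch comparison cascade.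
import Mathlib
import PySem

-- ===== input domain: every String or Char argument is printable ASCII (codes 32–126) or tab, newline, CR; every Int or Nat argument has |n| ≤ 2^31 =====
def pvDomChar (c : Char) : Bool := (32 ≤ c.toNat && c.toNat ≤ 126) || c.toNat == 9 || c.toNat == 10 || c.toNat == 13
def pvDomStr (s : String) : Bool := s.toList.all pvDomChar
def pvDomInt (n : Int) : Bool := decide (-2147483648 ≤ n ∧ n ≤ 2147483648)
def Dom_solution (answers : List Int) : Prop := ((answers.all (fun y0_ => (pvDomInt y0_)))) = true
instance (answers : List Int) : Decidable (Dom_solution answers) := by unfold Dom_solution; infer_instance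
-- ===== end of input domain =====

-- B replaces A's three flattened pattern copies and per-index comparison loop by a
-- residue-class frequency table: one pass tallies (i % 40, answer) pairs (40 = lcm of the
-- pattern lengths), then each score is a 40-term table-lookup sum; winners via max + filter.

-- ===== PORT A =====
-- All list indexing (s1[i], answers[i] for i in range(len(answers))) is in range in
-- Python, so getD with a dummy default is exact here.
def solution (answers : List Int) : List Int :=
  let a := answers.length
  let n1 := (List.range a).map (fun _ => ([1, 2, 3, 4, 5] : List Int))
  let n2 := (List.range a).map (fun _ => ([2, 1, 2, 3, 2, 4, 2, 5] : List Int))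
  let n3 := (List.range a).map (fun _ => ([3, 3, 1, 1, 2, 2, 4, 4, 5, 5] : List Int))
  let s1 := n1.flatMap (fun row => row)
  let s2 := n2.flatMap (fun row => row)
  let s3 := n3.flatMap (fun row => row)
  let cnt := (List.range a).foldl (fun (c : Int × Int × Int) i =>
    let c := if s1.getD i 0 = answers.getD i 0 then (c.1 + 1, c.2.1, c.2.2) else c
    let c := if s2.getD i 0 = answers.getD i 0 then (c.1, c.2.1 + 1, c.2.2) else c
    if s3.getD i 0 = answers.getD i 0 then (c.1, c.2.1, c.2.2 + 1) else c) ((0 : Int), (0 : Int), (0 : Int))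
  let cnt1 := cnt.1
  let cnt2 := cnt.2.1
  let cnt3 := cnt.2.2
  if cnt1 > cnt2 ∧ cnt1 > cnt3 then [1]
  else if cnt2 > cnt1 ∧ cnt2 > cnt3 then [2]
  else if cnt3 > cnt1 ∧ cnt3 > cnt2 then [3]
  else if cnt1 > cnt3 ∧ cnt2 > cnt3 ∧ cnt1 = cnt2 then [1, 2]
  else if cnt1 > cnt2 ∧ cnt3 > cnt2 ∧ cnt1 = cnt3 then [1, 3]
  else if cnt2 > cnt1 ∧ cnt3 > cnt1 ∧ cnt2 = cnt3 then [2, 3]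
  else if cnt1 = cnt2 ∧ cnt2 = cnt3 then [1, 2, 3]
  else []

-- ===== PORT B =====
-- p[r % len(p)] is always in range in Python, so pyGetD with a dummy default is exact;
-- dict freq with freq[key] = freq.get(key, 0) + 1 is Dict.insert with getD.
def solution_alt (answers : List Int) : List Int :=
  let freq := (PySem.List.enumerate answers).foldl
    (fun (d : PySem.Dict (Int × Int) Int) ia =>
      d.insert (PySem.Int.mod ia.1 40, ia.2) (d.getD (PySem.Int.mod ia.1 40, ia.2) 0 + 1))
    PySem.Dict.empty
  let score := fun (p : List Int) =>
    ((PySem.List.pyRange 0 40 1).map (fun r =>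
      freq.getD (r, PySem.List.pyGetD p (PySem.Int.mod r (p.length : Int)) 0) 0)).sum
  let s1 := score [1, 2, 3, 4, 5]
  let s2 := score [2, 1, 2, 3, 2, 4, 2, 5]
  let s3 := score [3, 3, 1, 1, 2, 2, 4, 4, 5, 5]
  let best := max s1 (max s2 s3)
  (([((1 : Int), s1), (2, s2), (3, s3)]).filter (fun ks => ks.2 == best)).map (fun ks => ks.1)

-- ===== PRECONDITION & SPEC =====
def Spec_solution (answers : List Int) (out : List Int) : Prop := out = solution_alt answers
instance (answers : List Int) (out : List Int) : Decidable (Spec_solution answers out) := by unfold Spec_solution; infer_instance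

-- ===== CLAIM =====
def Claim_equal_solution : Prop := ∀ (answers : List Int), Dom_solution answers → Spec_solution answers (solution answers)

-- ===== LEMMAS AND PROOFS =====

-- Flattened n-fold copies of a pattern, read at i < n * len, give the pattern at i % len.
theorem flat_getD (p : List Int) (d : Int) :
    ∀ (n i : Nat), i < n * p.length →
      (List.replicate n p).flatten.getD i d = p.getD (i % p.length) d := by
  intro n
  induction n with
  | zero => intro i h; omega
  | succ m ih =>
    intro i h
    simp only [List.replicate_succ, List.flatten_cons]
    by_cases hi : i < p.length
    · rw [List.getD_append _ _ _ _ hi, Nat.mod_eq_of_lt hi]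
    · rw [Nat.not_lt] at hi
      have hmul : (m + 1) * p.length = m * p.length + p.length := by ring
      rw [List.getD_append_right _ _ _ _ hi, ih (i - p.length) (by omega)]
      congr 1
      conv_rhs => rw [show i = (i - p.length) + p.length by omega, Nat.add_mod_right]

-- enumerate written as a map over range.
theorem enumerate_eq_map (l : List Int) :
    ∀ (k : Int), PySem.List.enumerate l k
      = (List.range l.length).map (fun (i : Nat) => (k + (i : Int), l.getD i 0)) := by
  induction l with
  | nil => intro k; simp [PySem.List.enumerate]
  | cons x t ih =>
    intro k
    simp only [PySem.List.enumerate, List.length_cons, List.range_succ_eq_map,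
      List.map_cons, List.map_map, ih (k + 1), List.cons.injEq]
    refine ⟨by simp, ?_⟩
    apply List.map_congr_left
    intro i _
    simp only [Function.comp_apply, Nat.succ_eq_add_one, List.getD_cons_succ, Prod.mk.injEq]
    exact ⟨by push_cast; ring, trivial⟩

-- One-hot indicator summed over range m.
theorem sum_indicator_range (c : Nat) :
    ∀ (m : Nat), ((List.range m).map (fun r => if c = r then (1 : Nat) else 0)).sum
      = if c < m then 1 else 0 := by
  intro m
  induction m with
  | zero => simp
  | succ k ih =>
    rw [List.range_succ, List.map_append, List.sum_append, ih]
    by_cases h : c = k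
    · simp [h]
    · by_cases h2 : c < k <;> simp [h, h2] <;> omega

-- Sum over residues of residue-restricted counts is the unrestricted count.
theorem sum_residue_countP (m : Nat) (hm : 0 < m) (Q : Nat → Bool) :
    ∀ (l : List Nat),
      ((List.range m).map (fun r => l.countP (fun i => decide (i % m = r) && Q i))).sum
        = l.countP Q := by
  intro l
  induction l with
  | nil => simp
  | cons x t ih =>
    simp only [List.countP_cons]
    have hsplit : ((List.range m).map (fun r =>
        t.countP (fun i => decide (i % m = r) && Q i)
          + if (decide (x % m = r) && Q x) = true then 1 else 0)).sum
        = ((List.range m).map (fun r => t.countP (fun i => decide (i % m = r) && Q i))).sum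
          + ((List.range m).map (fun r => if (decide (x % m = r) && Q x) = true then 1 else 0)).sum := by
      induction (List.range m) with
      | nil => simp
      | cons y ys ihy =>
        simp only [List.map_cons, List.sum_cons, ihy]
        ring
    rw [hsplit, ih]
    congr 1
    by_cases hq : Q x = true
    · simp only [hq, Bool.and_true, decide_eq_true_eq, if_true]
      rw [sum_indicator_range]
      simp [Nat.mod_lt x hm]
    · simp [hq]

-- both branch forms pick the labels attaining the maximal count
theorem pick_eq (c1 c2 c3 : Int) :
    (if c1 > c2 ∧ c1 > c3 then ([1] : List Int)
     else if c2 > c1 ∧ c2 > c3 then [2]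
     else if c3 > c1 ∧ c3 > c2 then [3]
     else if c1 > c3 ∧ c2 > c3 ∧ c1 = c2 then [1, 2]
     else if c1 > c2 ∧ c3 > c2 ∧ c1 = c3 then [1, 3]
     else if c2 > c1 ∧ c3 > c1 ∧ c2 = c3 then [2, 3]
     else if c1 = c2 ∧ c2 = c3 then [1, 2, 3]
     else [])
    = (([((1 : Int), c1), (2, c2), (3, c3)]).filter
        (fun ks => ks.2 == max c1 (max c2 c3))).map (fun ks => ks.1) := by
  simp only [List.filter_cons, List.filter_nil, beq_iff_eq, max_def]
  split_ifs <;> first | rfl | (exfalso; omega)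

-- one pattern's residue-table score equals the per-index match count
theorem score_eq (answers p : List Int) (hdvd : p.length ∣ 40) :
    ((PySem.List.pyRange 0 40 1).map (fun r =>
      (PySem.Dict.counter ((PySem.List.enumerate answers).map
          (fun ia => (PySem.Int.mod ia.1 40, ia.2)))).getD
        (r, PySem.List.pyGetD p (PySem.Int.mod r (p.length : Int)) 0) 0)).sum
    = ((List.range answers.length).countP
        (fun i => decide (p.getD (i % p.length) 0 = answers.getD i 0)) : Int) := by
  rw [show (40 : Int) = ((40 : Nat) : Int) from rfl, PySem.List.pyRange_zero_natCast,
    enumerate_eq_map answers 0, List.map_map, List.map_map]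
  simp only [Function.comp_def, zero_add, PySem.Int.mod_natCast, PySem.List.pyGetD_natCast,
    PySem.Dict.getD_counter, List.count_eq_countP, List.countP_map]
  have hmap : (List.range 40).map (fun (k : Nat) =>
      (((List.range answers.length).countP (fun i =>
        ((fun (i : Nat) => (((i % 40 : Nat) : Int), answers.getD i 0)) i
          == (((k : Nat) : Int), p.getD (k % p.length) 0))) : Nat) : Int))
      = (List.range 40).map (fun (k : Nat) =>
      (((List.range answers.length).countP (fun i =>
        decide (i % 40 = k) && decide (answers.getD i 0 = p.getD (i % 40 % p.length) 0))) : Int)) := by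
    apply List.map_congr_left
    intro k _
    congr 1
    apply List.countP_congr
    intro i _
    by_cases h : i % 40 = k
    · simp [h, Prod.ext_iff]
    · simp [h, Prod.ext_iff]
      intro hc
      exact absurd (by exact_mod_cast hc) h
  rw [hmap]
  have hcast : ((List.range 40).map (fun (k : Nat) =>
      (((List.range answers.length).countP (fun i =>
        decide (i % 40 = k) && decide (answers.getD i 0 = p.getD (i % 40 % p.length) 0))) : Int))).sum
      = (((List.range 40).map (fun (k : Nat) =>
        ((List.range answers.length).countP (fun i =>
          decide (i % 40 = k) && decide (answers.getD i 0 = p.getD (i % 40 % p.length) 0))))).sum : Int) := by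
    rw [Nat.cast_list_sum, List.map_map]
    rfl
  rw [hcast, sum_residue_countP 40 (by norm_num)
      (fun i => decide (answers.getD i 0 = p.getD (i % 40 % p.length) 0))]
  congr 1
  apply List.countP_congr
  intro i _
  rw [Nat.mod_mod_of_dvd i hdvd]
  simp [eq_comm]

theorem solution_spec : Claim_equal_solution := by
  intro answers _
  unfold Spec_solution solution solution_alt
  simp only []
  -- rewrite B's dict-building fold into a counter of the mapped pair list
  rw [← List.foldl_map (f := fun ia : Int × Int => (PySem.Int.mod ia.1 40, ia.2))
        (g := fun (d : PySem.Dict (Int × Int) Int) k => d.insert k (d.getD k 0 + 1)),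
      PySem.Dict.foldl_insert_getD_add_one_eq_counter]
  -- rewrite A's triple fold into three per-index counters
  have hfold :
      (List.range answers.length).foldl (fun (c : Int × Int × Int) i =>
        let c := if (((List.range answers.length).map
            (fun _ => ([1, 2, 3, 4, 5] : List Int))).flatMap (fun row => row)).getD i 0
            = answers.getD i 0 then (c.1 + 1, c.2.1, c.2.2) else c
        let c := if (((List.range answers.length).map
            (fun _ => ([2, 1, 2, 3, 2, 4, 2, 5] : List Int))).flatMap (fun row => row)).getD i 0
            = answers.getD i 0 then (c.1, c.2.1 + 1, c.2.2) else c
        if (((List.range answers.length).map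
            (fun _ => ([3, 3, 1, 1, 2, 2, 4, 4, 5, 5] : List Int))).flatMap (fun row => row)).getD i 0
            = answers.getD i 0 then (c.1, c.2.1, c.2.2 + 1) else c) ((0 : Int), (0 : Int), (0 : Int))
      = (List.range answers.length).foldl (fun (c : Int × Int × Int) (i : Nat) =>
          ((fun (a : Int) (i : Nat) => if (fun i => decide (([1, 2, 3, 4, 5] : List Int).getD (i % 5) 0 = answers.getD i 0)) i = true then a + 1 else a) c.1 i,
           (fun (b : Int × Int) (i : Nat) =>
             ((fun (a : Int) (i : Nat) => if (fun i => decide (([2, 1, 2, 3, 2, 4, 2, 5] : List Int).getD (i % 8) 0 = answers.getD i 0)) i = true then a + 1 else a) b.1 i,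
              (fun (a : Int) (i : Nat) => if (fun i => decide (([3, 3, 1, 1, 2, 2, 4, 4, 5, 5] : List Int).getD (i % 10) 0 = answers.getD i 0)) i = true then a + 1 else a) b.2 i)) c.2 i))
          ((0 : Int), ((0 : Int), (0 : Int))) := by
    apply PySem.List.foldl_congr_mem
    intro acc i hi
    rw [List.mem_range] at hi
    have hflat : ∀ (p : List Int), 0 < p.length →
        (((List.range answers.length).map (fun _ => p)).flatMap (fun row => row)).getD i 0
          = p.getD (i % p.length) 0 := by
      intro p hp
      have : ((List.range answers.length).map (fun _ => p)).flatMap (fun row => row)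
          = (List.replicate answers.length p).flatten := by
        simp [List.flatMap_def]
      rw [this, flat_getD p 0 answers.length i (by nlinarith)]
    rw [hflat [1, 2, 3, 4, 5] (by simp), hflat [2, 1, 2, 3, 2, 4, 2, 5] (by simp),
      hflat [3, 3, 1, 1, 2, 2, 4, 4, 5, 5] (by simp)]
    simp only [List.length_cons, List.length_nil, decide_eq_true_eq]
    split_ifs <;> rfl
  rw [hfold,
      PySem.List.foldl_prod_mk
        (fun (a : Int) (i : Nat) => if (fun i => decide (([1, 2, 3, 4, 5] : List Int).getD (i % 5) 0 = answers.getD i 0)) i = true then a + 1 else a)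
        (fun (b : Int × Int) (i : Nat) =>
          ((fun (a : Int) (i : Nat) => if (fun i => decide (([2, 1, 2, 3, 2, 4, 2, 5] : List Int).getD (i % 8) 0 = answers.getD i 0)) i = true then a + 1 else a) b.1 i,
           (fun (a : Int) (i : Nat) => if (fun i => decide (([3, 3, 1, 1, 2, 2, 4, 4, 5, 5] : List Int).getD (i % 10) 0 = answers.getD i 0)) i = true then a + 1 else a) b.2 i))
        (List.range answers.length) 0 ((0 : Int), (0 : Int)),
      PySem.List.foldl_prod_mk
        (fun (a : Int) (i : Nat) => if (fun i => decide (([2, 1, 2, 3, 2, 4, 2, 5] : List Int).getD (i % 8) 0 = answers.getD i 0)) i = true then a + 1 else a)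
        (fun (a : Int) (i : Nat) => if (fun i => decide (([3, 3, 1, 1, 2, 2, 4, 4, 5, 5] : List Int).getD (i % 10) 0 = answers.getD i 0)) i = true then a + 1 else a)
        (List.range answers.length) 0 0,
      PySem.List.foldl_count_if (fun i => decide (([1, 2, 3, 4, 5] : List Int).getD (i % 5) 0 = answers.getD i 0)),
      PySem.List.foldl_count_if (fun i => decide (([2, 1, 2, 3, 2, 4, 2, 5] : List Int).getD (i % 8) 0 = answers.getD i 0)),
      PySem.List.foldl_count_if (fun i => decide (([3, 3, 1, 1, 2, 2, 4, 4, 5, 5] : List Int).getD (i % 10) 0 = answers.getD i 0))]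
  rw [score_eq answers [1, 2, 3, 4, 5] (by simp),
      score_eq answers [2, 1, 2, 3, 2, 4, 2, 5] (by simp),
      score_eq answers [3, 3, 1, 1, 2, 2, 4, 4, 5, 5] (by simp)]
  simp only [List.length_cons, List.length_nil, zero_add]
  exact pick_eq _ _ _
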